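-- pv_equiv track=rewrite | github.com/hambonesoftware/FluidRAG | ingest/microchunker.py | _choose_boundary
-- ===== SOURCE A (Python) =====
-- from typing import (
--     Any,
--     Dict,
--     Iterable,
--     List,
--     Mapping,
--     Optional,
--     Sequence,
--     Set,
--     Tuple,
--     TypedDict,
-- )
--
-- BOUNDARY_WINDOW = 24
--
-- def _choose_boundary(target: int, candidates: Sequence[int], lower: int, upper: int) -> int:
--     """Select the best boundary near the ``target`` token index."""
--
--     if target >= upper:
--         return upper
--     window_low = max(lower + 1, target - BOUNDARY_WINDOW)
--     window_high = min(upper, target + BOUNDARY_WINDOW)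
--     best = None
--     best_gap = None
--     candidate_set = set(candidates)
--     for idx in range(window_low, window_high + 1):
--         if idx not in candidate_set:
--             continue
--         gap = abs(idx - target)
--         if best is None or gap < best_gap:
--             best = idx
--             best_gap = gap
--     if best is None:
--         # Fallback to the next available boundary after the target
--         for idx in candidates:
--             if idx > target:
--                 return idx
--         return upper
--     return min(max(best, lower + 1), upper)
-- ===== SOURCE B (Python) =====
-- BOUNDARY_WINDOW = 24
--
-- def _choose_boundary(target, candidates, lower, upper):
--     """Pick the candidate nearest to ``target`` inside the window, else the
--     first candidate after ``target``, else ``upper``."""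
--     if target >= upper:
--         return upper
--     window_low = max(lower + 1, target - BOUNDARY_WINDOW)
--     window_high = min(upper, target + BOUNDARY_WINDOW)
--     in_window = [c for c in candidates if window_low <= c <= window_high]
--     if in_window:
--         return min(in_window, key=lambda c: (abs(c - target), c))
--     for idx in candidates:
--         if idx > target:
--             return idx
--     return upper
-- ===== Notes on version B (the rewrite author's own statement) =====
-- stated objective: simpler
-- what changed: A scans all 49 integers of the window testing each against set(candidates); B filters the candidate list to the window and takes one keyed min (tie-break (abs(c-target), c)), dropping the per-integer scan and the redundant final clamp.
import Mathlib
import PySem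

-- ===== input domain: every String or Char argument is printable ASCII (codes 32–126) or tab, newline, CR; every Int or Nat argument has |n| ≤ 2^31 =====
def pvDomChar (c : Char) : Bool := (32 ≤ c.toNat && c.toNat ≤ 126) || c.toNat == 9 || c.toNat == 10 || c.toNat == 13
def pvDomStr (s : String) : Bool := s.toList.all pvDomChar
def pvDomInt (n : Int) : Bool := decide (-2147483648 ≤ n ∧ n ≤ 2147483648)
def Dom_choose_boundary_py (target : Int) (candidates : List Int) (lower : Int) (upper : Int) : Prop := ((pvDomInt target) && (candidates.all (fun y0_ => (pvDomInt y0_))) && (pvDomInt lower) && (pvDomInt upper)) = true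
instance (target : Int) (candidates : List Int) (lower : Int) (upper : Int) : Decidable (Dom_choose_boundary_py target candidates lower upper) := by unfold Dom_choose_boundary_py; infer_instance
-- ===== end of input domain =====

-- B replaces A's scan of every integer in the 49-wide window against set(candidates) by a single
-- filter over the candidates themselves plus one keyed min (objective: simpler; same observable result).

-- ===== PORT A =====
-- one iteration of A's `for idx in range(window_low, window_high + 1)` loop, state = (best, best_gap)
def bestStepA (target : Int) (cset : PySem.Set Int) (s : Option Int × Option Int) (idx : Int) : Option Int × Option Int :=
  if PySem.Set.contains cset idx = false then s
  else
    let gap := |idx - target|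
    match s with
    | (none, _) => (some idx, some gap)
    | (some b, some g) => if gap < g then (some idx, some gap) else (some b, some g)
    | (some b, none) => (some b, none)   -- unreachable: best_gap is set whenever best is

-- A's fallback loop: first candidate strictly after target, else upper
def fallbackA (target : Int) (upper : Int) : List Int → Int
  | [] => upper
  | c :: cs => if target < c then c else fallbackA target upper cs

def choose_boundary_py (target : Int) (candidates : List Int) (lower : Int) (upper : Int) : Int :=
  if target ≥ upper then upper
  else
    let window_low := max (lower + 1) (target - 24)
    let window_high := min upper (target + 24)
    let candidate_set := PySem.Set.ofList candidates
    let st := (PySem.List.pyRange window_low (window_high + 1) 1).foldl (bestStepA target candidate_set) (none, none)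
    match st.1 with
    | none => fallbackA target upper candidates
    | some best => min (max best (lower + 1)) upper

-- ===== PORT B =====
def choose_boundary_py_alt (target : Int) (candidates : List Int) (lower : Int) (upper : Int) : Int :=
  if target ≥ upper then upper
  else
    let window_low := max (lower + 1) (target - 24)
    let window_high := min upper (target + 24)
    let in_window := candidates.filter (fun c => decide (window_low ≤ c) && decide (c ≤ window_high))
    match PySem.List.min2? in_window (fun c => |c - target|) (fun c => c) with
    | some best => best
    | none =>
      match candidates.find? (fun c => decide (target < c)) with
      | some idx => idx
      | none => upper

-- ===== PRECONDITION & SPEC =====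
def Spec_choose_boundary_py (target : Int) (candidates : List Int) (lower : Int) (upper : Int) (out : Int) : Prop := out = choose_boundary_py_alt target candidates lower upper
instance (target : Int) (candidates : List Int) (lower : Int) (upper : Int) (out : Int) : Decidable (Spec_choose_boundary_py target candidates lower upper out) := by unfold Spec_choose_boundary_py; infer_instance

-- ===== CLAIM (what is proved, stated in full; the proofs are below) =====
def Claim_equal_choose_boundary_py : Prop := ∀ (target : Int) (candidates : List Int) (lower : Int) (upper : Int), Dom_choose_boundary_py target candidates lower upper → Spec_choose_boundary_py target candidates lower upper (choose_boundary_py target candidates lower upper)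

-- ===== LEMMAS AND PROOFS =====

-- "a is at least as good a boundary as b": smaller gap to target, ties to the smaller index
def lexle (t a b : Int) : Prop := |a - t| < |b - t| ∨ (|a - t| = |b - t| ∧ a ≤ b)

lemma lexle_refl (t a : Int) : lexle t a a := Or.inr ⟨rfl, le_refl a⟩

lemma lexle_trans {t a b c : Int} (h1 : lexle t a b) (h2 : lexle t b c) : lexle t a c := by
  rcases h1 with h1 | ⟨e1, l1⟩ <;> rcases h2 with h2 | ⟨e2, l2⟩
  · exact Or.inl (lt_trans h1 h2)
  · exact Or.inl (e2 ▸ h1)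
  · exact Or.inl (e1 ▸ h2)
  · exact Or.inr ⟨e1.trans e2, le_trans l1 l2⟩

lemma lexle_antisymm {t a b : Int} (h1 : lexle t a b) (h2 : lexle t b a) : a = b := by
  rcases h1 with h1 | ⟨e1, l1⟩ <;> rcases h2 with h2 | ⟨e2, l2⟩
  · exact absurd (lt_trans h1 h2) (lt_irrefl _)
  · exact absurd (e2 ▸ h1) (lt_irrefl _)
  · exact absurd (e1 ▸ h2) (lt_irrefl _)
  · exact le_antisymm l1 l2

lemma lexle_of_not_lt {t a b : Int} (hle : ¬ |b - t| < |a - t|) (hab : a ≤ b) : lexle t a b := by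
  rcases lt_or_eq_of_le (not_lt.mp hle) with h | h
  · exact Or.inl h
  · exact Or.inr ⟨h, hab⟩

-- ---- B side: characterisation of min2? with key (|c - t|, c) ----

-- the fold step of PySem.List.min2? at these keys
def bstep (t : Int) (acc : Option Int) (x : Int) : Option Int :=
  match acc with
  | none => some x
  | some m => if (decide (|x - t| < |m - t|) || !decide (|m - t| < |x - t|) && decide (x < m)) = true then some x else some m

lemma min2?_eq_foldl (t : Int) (xs : List Int) :
    PySem.List.min2? xs (fun c => |c - t|) (fun c => c) = xs.foldl (bstep t) none := by
  unfold PySem.List.min2? bstep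
  congr 1
  funext acc x
  cases acc <;> rfl

lemma bstep_some (t a x : Int) :
    ∃ c, bstep t (some a) x = some c ∧ (c = a ∨ c = x) ∧ lexle t c a ∧ lexle t c x := by
  unfold bstep
  by_cases h : (decide (|x - t| < |a - t|) || !decide (|a - t| < |x - t|) && decide (x < a)) = true
  · refine ⟨x, by simp [h], Or.inr rfl, ?_, lexle_refl t x⟩
    simp only [Bool.or_eq_true, Bool.and_eq_true, Bool.not_eq_true', decide_eq_true_eq,
      decide_eq_false_iff_not] at h
    rcases h with h | ⟨hn, hlt⟩
    · exact Or.inl h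
    · exact lexle_of_not_lt hn (le_of_lt hlt)
  · refine ⟨a, by simp [h], Or.inl rfl, lexle_refl t a, ?_⟩
    simp only [Bool.or_eq_true, Bool.and_eq_true, Bool.not_eq_true', decide_eq_true_eq,
      decide_eq_false_iff_not, not_or, not_and, not_lt] at h
    obtain ⟨h1, h2⟩ := h
    rcases lt_or_eq_of_le h1 with h | h
    · exact Or.inl h
    · exact Or.inr ⟨h, h2 (le_of_eq h.symm)⟩

lemma bstep_foldl_some (t : Int) : ∀ (xs : List Int) (a : Int),
    ∃ m, xs.foldl (bstep t) (some a) = some m ∧ (m = a ∨ m ∈ xs) ∧ lexle t m a ∧ ∀ y ∈ xs, lexle t m y := by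
  intro xs
  induction xs with
  | nil => exact fun a => ⟨a, rfl, Or.inl rfl, lexle_refl t a, by simp⟩
  | cons x l ih =>
    intro a
    obtain ⟨c, hc, hcmem, hca, hcx⟩ := bstep_some t a x
    obtain ⟨m, hm, hmmem, hmc, hall⟩ := ih c
    refine ⟨m, ?_, ?_, ?_, ?_⟩
    · simpa [List.foldl_cons, hc] using hm
    · rcases hmmem with rfl | hmem
      · rcases hcmem with rfl | rfl
        · exact Or.inl rfl
        · exact Or.inr (List.mem_cons_self)
      · exact Or.inr (List.mem_cons_of_mem _ hmem)
    · exact lexle_trans hmc hca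
    · intro y hy
      rcases List.mem_cons.mp hy with rfl | hy
      · exact lexle_trans hmc hcx
      · exact hall y hy

lemma min2?_best (t : Int) (x : Int) (l : List Int) :
    ∃ m, PySem.List.min2? (x :: l) (fun c => |c - t|) (fun c => c) = some m ∧
      m ∈ x :: l ∧ ∀ y ∈ x :: l, lexle t m y := by
  rw [min2?_eq_foldl]
  obtain ⟨m, hm, hmem, hmx, hall⟩ := bstep_foldl_some t l x
  refine ⟨m, by simpa [List.foldl_cons, bstep] using hm, ?_, ?_⟩
  · rcases hmem with rfl | h
    · exact List.mem_cons_self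
    · exact List.mem_cons_of_mem _ h
  · intro y hy
    rcases List.mem_cons.mp hy with rfl | hy
    · exact hmx
    · exact hall y hy

-- ---- A side: characterisation of the window-scan loop ----

lemma Aloop (t wl : Int) (cands : List Int) : ∀ n : Nat,
    (((List.range n).map (fun k : Nat => wl + (k : Int))).foldl (bestStepA t (PySem.Set.ofList cands)) (none, none) = (none, none)
       ∧ ∀ c ∈ cands, ¬ (wl ≤ c ∧ c < wl + n))
    ∨ (∃ b, ((List.range n).map (fun k : Nat => wl + (k : Int))).foldl (bestStepA t (PySem.Set.ofList cands)) (none, none) = (some b, some |b - t|)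
       ∧ b ∈ cands ∧ wl ≤ b ∧ b < wl + n
       ∧ ∀ y ∈ cands, wl ≤ y → y < wl + n → lexle t b y) := by
  intro n
  induction n with
  | zero => left; refine ⟨rfl, ?_⟩; intro c _; omega
  | succ n ih =>
    rw [List.range_succ, List.map_append, List.foldl_append]
    rcases ih with ⟨hst, hemp⟩ | ⟨b, hst, hbmem, hbl, hbu, hbest⟩
    · rw [hst]
      by_cases hm : wl + (n : Int) ∈ cands
      · right
        refine ⟨wl + (n : Int), by simp [bestStepA, hm], hm, by omega, by omega, ?_⟩
        intro y hy hyl hyu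
        have := hemp y hy
        have hyeq : y = wl + (n : Int) := by omega
        rw [hyeq]
        exact lexle_refl t _
      · left
        refine ⟨by simp [bestStepA, hm], ?_⟩
        intro c hcmem
        have h1 := hemp c hcmem
        have h2 : c ≠ wl + (n : Int) := fun he => hm (he ▸ hcmem)
        omega
    · rw [hst]
      by_cases hm : wl + (n : Int) ∈ cands
      · by_cases hg : |wl + (n : Int) - t| < |b - t|
        · right
          refine ⟨wl + (n : Int), by simp [bestStepA, hm, hg], hm, by omega, by omega, ?_⟩
          intro y hy hyl hyu
          by_cases hyn : y < wl + (n : Int)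
          · exact lexle_trans (Or.inl hg) (hbest y hy hyl hyn)
          · have hyeq : y = wl + (n : Int) := by omega
            rw [hyeq]; exact lexle_refl t _
        · right
          refine ⟨b, by simp [bestStepA, hm, hg], hbmem, hbl, by omega, ?_⟩
          intro y hy hyl hyu
          by_cases hyn : y < wl + (n : Int)
          · exact hbest y hy hyl hyn
          · have hyeq : y = wl + (n : Int) := by omega
            rw [hyeq]
            exact lexle_of_not_lt hg (by omega)
      · right
        refine ⟨b, by simp [bestStepA, hm], hbmem, hbl, by omega, ?_⟩
        intro y hy hyl hyu
        have h2 : y ≠ wl + (n : Int) := fun he => hm (he ▸ hy)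
        exact hbest y hy hyl (by omega)

-- ---- fallback loops agree ----
lemma fallback_eq (t u : Int) (cs : List Int) :
    fallbackA t u cs = (match cs.find? (fun c => decide (t < c)) with | some idx => idx | none => u) := by
  induction cs with
  | nil => rfl
  | cons c cs ih =>
    by_cases h : t < c
    · simp [fallbackA, List.find?, h]
    · simp [fallbackA, List.find?, h, ih]

-- ===== VERDICT (by name: the statement is the Claim_ definition above) =====
theorem choose_boundary_py_spec : Claim_equal_choose_boundary_py := by
  intro target candidates lower upper _
  unfold Spec_choose_boundary_py choose_boundary_py choose_boundary_py_alt
  by_cases hto : target ≥ upper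
  · simp [hto]
  · simp only [hto, if_false]
    set wl := max (lower + 1) (target - 24) with hwl
    set wh := min upper (target + 24) with hwh
    have hrange : PySem.List.pyRange wl (wh + 1) 1 = (List.range (wh + 1 - wl).toNat).map (fun k : Nat => wl + (k : Int)) :=
      PySem.List.pyRange_one wl (wh + 1)

    rw [hrange]
    set n := (wh + 1 - wl).toNat with hn
    have hwin : ∀ c : Int, (wl ≤ c ∧ c < wl + n) ↔ (wl ≤ c ∧ c ≤ wh) := by
      intro c; omega
    rcases Aloop target wl candidates n with ⟨hst, hemp⟩ | ⟨b, hst, hbmem, hbl, hbu, hbest⟩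
    · rw [hst]
      have hfil : candidates.filter (fun c => decide (wl ≤ c) && decide (c ≤ wh)) = [] := by
        rw [List.filter_eq_nil_iff]
        intro c hc
        have := hemp c hc
        simp only [Bool.and_eq_true, decide_eq_true_eq]
        intro hcontra
        exact this ((hwin c).mpr ⟨hcontra.1, hcontra.2⟩)
      rw [hfil]
      exact fallback_eq target upper candidates
    · rw [hst]
      have hbwh : b ≤ wh := by omega
      have hbmemf : b ∈ candidates.filter (fun c => decide (wl ≤ c) && decide (c ≤ wh)) := by
        simp only [List.mem_filter, Bool.and_eq_true, decide_eq_true_eq]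
        exact ⟨hbmem, hbl, hbwh⟩
      obtain ⟨x, l, hxl⟩ : ∃ x l, candidates.filter (fun c => decide (wl ≤ c) && decide (c ≤ wh)) = x :: l := by
        cases hflt : candidates.filter (fun c => decide (wl ≤ c) && decide (c ≤ wh)) with
        | nil => rw [hflt] at hbmemf; simp at hbmemf
        | cons x l => exact ⟨x, l, rfl⟩
      rw [hxl]
      obtain ⟨m, hm, hmmem, hmall⟩ := min2?_best target x l
      rw [hm]
      have hmemf : m ∈ candidates.filter (fun c => decide (wl ≤ c) && decide (c ≤ wh)) := hxl ▸ hmmem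
      have hmc : m ∈ candidates ∧ wl ≤ m ∧ m ≤ wh := by
        simpa only [List.mem_filter, Bool.and_eq_true, decide_eq_true_eq, and_assoc] using hmemf
      have h1 : lexle target b m := hbest m hmc.1 hmc.2.1 (by omega)
      have h2 : lexle target m b := hmall b (hxl ▸ hbmemf)
      have hbm : b = m := lexle_antisymm h1 h2
      show min (max b (lower + 1)) upper = m
      rw [← hbm]
      omega
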